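-- pv_equiv track=rewrite | github.com/IainMcWhinnie/Compiler-Project | esc_tools.py | replace_with_esc
-- ===== SOURCE A (Python) =====
-- def replace_with_esc(string, target, new):
--     # init a new string and a boolean for escapement
--     new_string = ''
--     escape = False
--
--     # for each character
--     for char in string:
--
--         if escape: # if the character is escaped simply add it to the string regardless and turn escape off
--             new_string += char
--             escape = False
--
--         elif char == '\\': # if character is an unescaped backslash then set escape to true and add to string
--             escape = True
--             new_string += '\\'
--
--         else: # otherwise as long as the character isnt the target to remove then add it
--             if char != target:
--                 new_string += char
--
--     return new_string
-- ===== SOURCE B (Python) =====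
-- def replace_with_esc(string, target, new):
--     # tokenize: each token is an escape pair '\X', a lone trailing '\', or a single char
--     tokens = []
--     i = 0
--     n = len(string)
--     while i < n:
--         if string[i] == '\\':
--             tokens.append(string[i:i+2])
--             i += 2
--         else:
--             tokens.append(string[i])
--             i += 1
--     # keep every escape token, and every plain char that is not the target
--     return ''.join(t for t in tokens if t.startswith('\\') or t != target)
-- ===== Notes on version B (the rewrite author's own statement) =====
-- stated objective: idiomatic
-- what changed: Replaced A's character-by-character escape-flag state machine with a tokenize-then-filter pipeline: the string is split into tokens (escape pair, lone trailing backslash, or single char) and the result joins every token that starts with a backslash or differs from the target.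
import Mathlib
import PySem

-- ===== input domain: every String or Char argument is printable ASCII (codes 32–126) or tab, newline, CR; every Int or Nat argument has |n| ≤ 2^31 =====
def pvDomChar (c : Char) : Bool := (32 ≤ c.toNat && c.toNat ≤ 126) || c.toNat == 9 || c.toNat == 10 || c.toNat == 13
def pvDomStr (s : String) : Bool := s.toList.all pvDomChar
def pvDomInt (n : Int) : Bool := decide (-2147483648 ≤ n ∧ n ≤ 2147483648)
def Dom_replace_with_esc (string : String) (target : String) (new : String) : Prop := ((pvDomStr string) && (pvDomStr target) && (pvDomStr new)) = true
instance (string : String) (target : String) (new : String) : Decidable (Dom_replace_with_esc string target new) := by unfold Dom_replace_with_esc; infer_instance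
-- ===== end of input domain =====

-- B replaces A's escape-flag state machine by a tokenize-then-filter pipeline (idiomatic; same cost).

-- ===== PORT A =====
-- A's loop over the characters with the `escape` flag as explicit state;
-- Python's `char != target` compares a one-character string with `target`.
def replaceA (target : String) : List Char → Bool → List Char
  | [], _ => []
  | c :: rest, escape =>
    if escape then c :: replaceA target rest false
    else if c = '\\' then '\\' :: replaceA target rest true
    else if String.ofList [c] ≠ target then c :: replaceA target rest false
    else replaceA target rest false

def replace_with_esc (string : String) (target : String) (new : String) : String :=
  String.ofList (replaceA target string.toList false)

-- ===== PORT B =====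
-- B's tokenizer: escape pair, lone trailing backslash, or single char.
def tokensB : List Char → List (List Char)
  | [] => []
  | '\\' :: c :: rest => ['\\', c] :: tokensB rest
  | '\\' :: [] => [['\\']]
  | c :: rest => [c] :: tokensB rest

-- B's filter: keep escape tokens and plain chars different from target.
def keepB (target : String) (t : List Char) : Bool :=
  t.head? = some '\\' || String.ofList t ≠ target

def replace_with_esc_alt (string : String) (target : String) (new : String) : String :=
  String.ofList (((tokensB string.toList).filter (keepB target)).flatten)

-- ===== PRECONDITION & SPEC =====
def Spec_replace_with_esc (string : String) (target : String) (new : String) (out : String) : Prop := out = replace_with_esc_alt string target new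
instance (string : String) (target : String) (new : String) (out : String) : Decidable (Spec_replace_with_esc string target new out) := by unfold Spec_replace_with_esc; infer_instance

-- ===== CLAIM (what is proved, stated in full; the proofs are below) =====
def Claim_equal_replace_with_esc : Prop := ∀ (string : String) (target : String) (new : String), Dom_replace_with_esc string target new → Spec_replace_with_esc string target new (replace_with_esc string target new)

-- ===== LEMMAS AND PROOFS =====
theorem replaceA_eq_tokens (target : String) (l : List Char) :
    replaceA target l false = ((tokensB l).filter (keepB target)).flatten := by
  induction l using tokensB.induct with
  | case1 => simp [replaceA, tokensB]
  | case2 c rest ih =>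
    simp [replaceA, tokensB, keepB, List.filter, ih]
  | case3 =>
    simp [replaceA, tokensB, keepB, List.filter]
  | case4 c rest h1 h2 ih =>
    have hc : c ≠ '\\' := by
      intro e
      cases rest with
      | nil => exact h2 e rfl
      | cons a l => exact h1 a l e rfl
    by_cases h : String.ofList [c] = target <;>
      simp [replaceA, tokensB, keepB, List.filter, hc, h, ih]

-- ===== VERDICT (by name: the statement is the Claim_ definition above) =====
theorem replace_with_esc_spec : Claim_equal_replace_with_esc := by
  intro string target new _
  unfold Spec_replace_with_esc replace_with_esc replace_with_esc_alt
  rw [replaceA_eq_tokens]
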